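-- pv_equiv track=rewrite | github.com/Kenio1412/STSA | Function.py | find_caesar_key
-- ===== SOURCE A (Python) =====
-- def find_caesar_key(freq: dict) -> tuple:
--     key = 0
--     key_second = 0
--     max_freq = 0
--     max_second_freq = 0
--     for i in range(26):
--         if chr(i + 65).lower() in freq:
--             if freq[chr(i + 65).lower()] > max_freq:
--                 max_second_freq = max_freq
--                 max_freq = freq[chr(i + 65).lower()]
--                 key_second = key
--                 key = i
--             elif freq[chr(i + 65).lower()] > max_second_freq:
--                 max_second_freq = freq[chr(i + 65).lower()]
--                 key_second = i
--     if (key - 4) % 26 == (key_second - 18) % 26: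
--         return ((key - 4) % 26,)
--     else:
--         return (key - 4) % 26, (key_second - 18) % 26
-- ===== SOURCE B (Python) =====
-- def find_caesar_key(freq: dict) -> tuple:
--     # table-build-then-stable-sort instead of a streaming two-maxima scan
--     pairs = [(i, freq[chr(i + 97)]) for i in range(26)
--              if chr(i + 97) in freq and freq[chr(i + 97)] > 0]
--     pairs.sort(key=lambda p: -p[1])
--     key = pairs[0][0] if pairs else 0
--     key_second = pairs[1][0] if len(pairs) > 1 else 0
--     a, b = (key - 4) % 26, (key_second - 18) % 26
--     return (a,) if a == b else (a, b)
-- ===== Notes on version B (the rewrite author's own statement) =====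
-- stated objective: alternative
-- what changed: Replaces A's single-pass streaming two-running-maxima scan with building an (index, frequency) table of the positive-frequency letters and stably sorting it by descending frequency, taking the first two entries (defaulting to 0).
import Mathlib
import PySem

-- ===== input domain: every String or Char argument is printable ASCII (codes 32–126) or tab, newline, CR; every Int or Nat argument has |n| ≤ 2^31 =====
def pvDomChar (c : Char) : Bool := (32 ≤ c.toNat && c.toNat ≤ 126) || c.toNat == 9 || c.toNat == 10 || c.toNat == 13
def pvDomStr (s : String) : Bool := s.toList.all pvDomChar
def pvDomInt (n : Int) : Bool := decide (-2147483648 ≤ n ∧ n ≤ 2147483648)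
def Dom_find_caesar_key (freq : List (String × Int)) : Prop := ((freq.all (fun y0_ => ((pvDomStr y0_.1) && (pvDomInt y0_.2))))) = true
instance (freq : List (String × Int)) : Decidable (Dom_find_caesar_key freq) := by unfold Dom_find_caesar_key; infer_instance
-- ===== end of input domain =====

-- B replaces A's streaming two-running-maxima scan by building the (index, frequency)
-- table of positive-frequency letters and stably sorting it by descending frequency
-- (objective: alternative — a genuinely different algorithm, not claimed faster).

-- ===== PORT A =====
-- chr(i + 65).lower() for the loop index i (0 ≤ i < 26, so .toNat is exact here)
def pvLetterA (i : Int) : String :=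
  PySem.Str.lower (String.ofList [Char.ofNat (i + 65).toNat])

-- one iteration of A's loop; state = (key, key_second, max_freq, max_second_freq);
-- the 'c in freq' test followed by 'freq[c]' is ported as the single lookup get?
def pvStepA (freq : List (String × Int)) (st : Int × Int × Int × Int) (i : Int) :
    Int × Int × Int × Int :=
  match (PySem.Dict.mk freq).get? (pvLetterA i) with
  | none => st
  | some v =>
    if v > st.2.2.1 then (i, st.1, v, st.2.2.1)
    else if v > st.2.2.2 then (st.1, i, st.2.2.1, v)
    else st

def find_caesar_key (freq : List (String × Int)) : List Int :=
  let st := (PySem.List.pyRange 0 26 1).foldl (pvStepA freq) (0, 0, 0, 0)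
  if PySem.Int.mod (st.1 - 4) 26 = PySem.Int.mod (st.2.1 - 18) 26 then
    [PySem.Int.mod (st.1 - 4) 26]
  else
    [PySem.Int.mod (st.1 - 4) 26, PySem.Int.mod (st.2.1 - 18) 26]

-- ===== PORT B =====
-- chr(i + 97) for 0 ≤ i < 26 (.toNat exact there)
def pvLetterB (i : Int) : String := String.ofList [Char.ofNat (i + 97).toNat]

-- the comprehension '[(i, freq[c]) for i in range(26) if c in freq and freq[c] > 0]'
def pvCollectB (freq : List (String × Int)) (i : Int) : Option (Int × Int) :=
  match (PySem.Dict.mk freq).get? (pvLetterB i) with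
  | some v => if v > 0 then some (i, v) else none
  | none => none

def find_caesar_key_alt (freq : List (String × Int)) : List Int :=
  let pairs := PySem.List.sorted
      ((PySem.List.pyRange 0 26 1).filterMap (pvCollectB freq)) (fun p => -p.2)
  let key : Int := match pairs with | p :: _ => p.1 | [] => 0
  let key_second : Int := match pairs with | _ :: q :: _ => q.1 | _ => 0
  let a := PySem.Int.mod (key - 4) 26
  let b := PySem.Int.mod (key_second - 18) 26
  if a = b then [a] else [a, b]

-- ===== PRECONDITION & SPEC =====
def Spec_find_caesar_key (freq : List (String × Int)) (out : List Int) : Prop := out = find_caesar_key_alt freq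
instance (freq : List (String × Int)) (out : List Int) : Decidable (Spec_find_caesar_key freq out) := by unfold Spec_find_caesar_key; infer_instance

-- ===== CLAIM (what is proved, stated in full; the proofs are below) =====
def Claim_equal_find_caesar_key : Prop := ∀ (freq : List (String × Int)), Dom_find_caesar_key freq → Spec_find_caesar_key freq (find_caesar_key freq)

-- ===== LEMMAS AND PROOFS =====

-- the stable-insertion step used by PySem.List.sorted with key (fun p => -p.2)
def pvIns (x : Int × Int) (acc : List (Int × Int)) : List (Int × Int) :=
  PySem.List.insertBy (fun a b => decide ((-a.2 : Int) < -b.2)) x acc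

-- invariant tying A's running state to the first two entries of B's sorted table
def pvInv (st : Int × Int × Int × Int) (acc : List (Int × Int)) : Prop :=
  match acc with
  | [] => st = (0, 0, 0, 0)
  | [a] => st = (a.1, 0, a.2, 0) ∧ 0 < a.2
  | a :: b :: _ => st = (a.1, b.1, a.2, b.2) ∧ 0 < b.2 ∧ b.2 ≤ a.2

lemma pvIns_nil (x : Int × Int) : pvIns x [] = [x] := rfl

lemma pvIns_cons (x y : Int × Int) (ys : List (Int × Int)) :
    pvIns x (y :: ys) =
      if (-x.2 : Int) < -y.2 then x :: y :: ys else y :: pvIns x ys := by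
  simp [pvIns, PySem.List.insertBy]

lemma pvLetter_eq : ∀ i ∈ PySem.List.pyRange 0 26 1, pvLetterA i = pvLetterB i := by
  decide

lemma pvInv_step (freq : List (String × Int)) (st : Int × Int × Int × Int)
    (acc : List (Int × Int)) (i : Int) (hlet : pvLetterA i = pvLetterB i)
    (h : pvInv st acc) :
    pvInv (pvStepA freq st i)
      (match pvCollectB freq i with
       | some x => pvIns x acc
       | none => acc) := by
  unfold pvStepA pvCollectB
  rw [hlet]
  cases hget : (PySem.Dict.mk freq).get? (pvLetterB i) with
  | none => simpa using h
  | some v =>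
    simp only []
    by_cases hv : v > 0
    · simp only [if_pos hv]
      match acc with
      | [] =>
        simp only [pvInv] at h
        simp [pvIns_nil, pvInv, h, hv]
      | [a] =>
        obtain ⟨hst, ha⟩ := h
        subst hst
        rw [pvIns_cons]
        by_cases h1 : (-(i, v).2 : Int) < -a.2
        · simp only [if_pos h1]
          have : v > a.2 := by simpa using h1
          simp [pvInv, this]
          omega
        · simp only [if_neg h1, pvIns_nil]
          have hle : v ≤ a.2 := by simpa using h1
          have h2 : ¬ v > a.2 := by omega
          simp [pvInv, h2, hv]
          omega
      | a :: b :: t =>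
        obtain ⟨hst, hb, hba⟩ := h
        subst hst
        rw [pvIns_cons]
        by_cases h1 : (-(i, v).2 : Int) < -a.2
        · have : v > a.2 := by simpa using h1
          simp [pvInv, this]
          omega
        · have hle : v ≤ a.2 := by simpa using h1
          have h2 : ¬ v > a.2 := by omega
          simp only [if_neg h1]
          rw [pvIns_cons]
          by_cases h3 : (-(i, v).2 : Int) < -b.2
          · have : v > b.2 := by simpa using h3
            simp [pvInv, h2, this]
            omega
          · have hvb : v ≤ b.2 := by simpa using h3
            have h4 : ¬ v > b.2 := by omega
            simp only [if_neg h3]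
            cases t with
            | nil => simp [pvInv, h2, h4, hb, hba]
            | cons c t' =>
              rw [pvIns_cons]
              by_cases h5 : (-(i, v).2 : Int) < -c.2 <;>
                simp [pvInv, h2, h4, hb, hba]
    · -- v ≤ 0: A's two strict comparisons both fail (running maxima are ≥ 0)
      simp only [if_neg hv]
      have hv' : v ≤ 0 := by omega
      match acc with
      | [] =>
        have h2 : ¬ v > (0 : Int) := by omega
        simp only [pvInv] at h; subst h
        simp [pvInv, h2]
      | [a] =>
        obtain ⟨hst, ha⟩ := h; subst hst
        have h2 : ¬ v > a.2 := by omega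
        have h4 : ¬ v > (0 : Int) := by omega
        simp [pvInv, h2, h4, ha]
      | a :: b :: t =>
        obtain ⟨hst, hb, hba⟩ := h; subst hst
        have h2 : ¬ v > a.2 := by omega
        have h4 : ¬ v > b.2 := by omega
        simp [pvInv, h2, h4, hb, hba]

lemma pvInv_fold (freq : List (String × Int)) :
    ∀ (L : List Int) (st : Int × Int × Int × Int) (acc : List (Int × Int)),
      (∀ i ∈ L, pvLetterA i = pvLetterB i) →
      pvInv st acc →
      pvInv (L.foldl (pvStepA freq) st)
        ((L.filterMap (pvCollectB freq)).foldl (fun acc x => pvIns x acc) acc) := by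
  intro L
  induction L with
  | nil => intro st acc _ h; simpa using h
  | cons i L ih =>
    intro st acc hlet h
    have hi := hlet i (by simp)
    have hrest : ∀ j ∈ L, pvLetterA j = pvLetterB j := fun j hj => hlet j (by simp [hj])
    have hstep := pvInv_step freq st acc i hi h
    simp only [List.foldl_cons, List.filterMap_cons]
    cases hc : pvCollectB freq i with
    | none =>
      rw [hc] at hstep
      exact ih _ _ hrest hstep
    | some x =>
      rw [hc] at hstep
      simpa using ih _ _ hrest hstep

-- ===== VERDICT (by name: the statement is the Claim_ definition above) =====
theorem find_caesar_key_spec : Claim_equal_find_caesar_key := by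
  intro freq _
  unfold Spec_find_caesar_key find_caesar_key find_caesar_key_alt
  have hsort := PySem.List.sorted_eq_foldl_insertBy
      ((PySem.List.pyRange 0 26 1).filterMap (pvCollectB freq)) (fun p : Int × Int => -p.2)
  have hinv := pvInv_fold freq (PySem.List.pyRange 0 26 1) (0, 0, 0, 0) []
      pvLetter_eq (by simp [pvInv])
  rw [hsort]
  have heq : (fun (acc : List (Int × Int)) (x : Int × Int) =>
      PySem.List.insertBy (fun a b => decide ((fun p : Int × Int => -p.2) a < (fun p : Int × Int => -p.2) b)) x acc)
      = fun acc x => pvIns x acc := rfl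
  rw [heq]
  set s := ((PySem.List.pyRange 0 26 1).filterMap (pvCollectB freq)).foldl
      (fun acc x => pvIns x acc) [] with hs
  set st := (PySem.List.pyRange 0 26 1).foldl (pvStepA freq) (0, 0, 0, 0) with hst
  match s, hinv with
  | [], h => simp only [pvInv] at h; rw [h]
  | [a], h => obtain ⟨h1, _⟩ := h; rw [h1]
  | a :: b :: t, h => obtain ⟨h1, _, _⟩ := h; rw [h1]
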